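-- pv_equiv track=rewrite | github.com/stat-thon/CodingTestStudy_2024 | Thon/Programmers/241003_택배상자.py | solution
-- ===== SOURCE A (Python) =====
-- def solution(order):
--
--     from collections import deque
--     n = len(order)
--     order = deque(order)
--     belt = deque([i+1 for i in range(n)])
--     result = []
--     conv = deque()
--
--     while belt or (conv and conv[-1] == order[0]):
--         if conv and conv[-1] == order[0]:
--             result.append(conv.pop())
--             order.popleft()
--         elif belt[0] == order[0]:
--             result.append(belt.popleft())
--             order.popleft()
--         else:
--             conv.append(belt.popleft())
--
--     return len(result)
-- ===== SOURCE B (Python) =====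
-- def solution(order):
--     # No stack simulation: a box t is loadable either fresh from the belt (t exceeds the
--     # running maximum m of loaded boxes, and t <= n) or from the conveyor, whose top is
--     # always the largest not-yet-loaded box below m; track loaded boxes in a set.
--     n = len(order)
--     seen = set()
--     m = 0
--     count = 0
--     for t in order:
--         if t > m:
--             if t > n:
--                 break
--             m = t
--         else:
--             x = m
--             while x >= 1 and x in seen:
--                 x -= 1
--             if x < 1 or x != t:
--                 break
--         seen.add(t)
--         count += 1
--     return count
-- ===== Notes on version B (the rewrite author's own statement) =====
-- stated objective: alternative
-- what changed: Replaced A's deque simulation (belt deque 1..n, conveyor stack, result list) by a stack-free pass that keeps only the set of loaded boxes and the running maximum m, using the invariant that the conveyor's top is always the largest not-yet-loaded box below m (found by scanning x = m, m-1, ... past loaded boxes).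
import Mathlib
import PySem

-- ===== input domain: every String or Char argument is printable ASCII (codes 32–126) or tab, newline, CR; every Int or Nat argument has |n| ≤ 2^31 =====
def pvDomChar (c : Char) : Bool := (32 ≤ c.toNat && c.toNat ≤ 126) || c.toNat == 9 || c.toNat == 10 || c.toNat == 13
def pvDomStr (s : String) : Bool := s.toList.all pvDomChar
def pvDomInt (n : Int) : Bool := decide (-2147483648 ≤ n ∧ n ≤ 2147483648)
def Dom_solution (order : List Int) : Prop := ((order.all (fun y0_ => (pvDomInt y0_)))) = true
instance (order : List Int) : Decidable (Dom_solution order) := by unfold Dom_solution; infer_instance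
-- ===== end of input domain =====

-- B drops the stack simulation entirely: it tracks the set of loaded boxes and the running
-- maximum m, using the fact that the conveyor's top is always the largest not-yet-loaded
-- box below m (alternative algorithm; not claimed faster).

-- ===== PORT A =====
-- conveyor `conv` is kept top-first (Python appends/pops at the right); `belt` head-first.
def solutionLoop (ordq belt conv res : List Int) : List Int :=
  if _hcond : belt ≠ [] ∨ (conv ≠ [] ∧ conv.head? = ordq.head?) then
    if _hc : conv ≠ [] ∧ conv.head? = ordq.head? then
      solutionLoop ordq.tail belt conv.tail (res ++ [conv.headI])
    else if _hb : belt.head? = ordq.head? then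
      solutionLoop ordq.tail belt.tail conv (res ++ [belt.headI])
    else
      solutionLoop ordq belt.tail (belt.headI :: conv) res
  else res
termination_by 2 * belt.length + conv.length + ordq.length
decreasing_by
  · rcases _hc with ⟨hne, _⟩
    have := List.length_pos_of_ne_nil hne
    simp [List.length_tail]; omega
  · have hbne : belt ≠ [] := by
      rcases _hcond with h | h
      · exact h
      · exact absurd h _hc
    have := List.length_pos_of_ne_nil hbne
    simp [List.length_tail]; omega
  · have hbne : belt ≠ [] := by
      rcases _hcond with h | h
      · exact h
      · exact absurd h _hc
    have := List.length_pos_of_ne_nil hbne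
    simp [List.length_tail]; omega

def solution (order : List Int) : Int :=
  let n := order.length
  let belt := (List.range n).map (fun (i : Nat) => (i : Int) + 1)
  ((solutionLoop order belt [] []).length : Int)

-- ===== PORT B =====
-- termination helpers for the `while x in seen: x -= 1` loop (cited by findTop's decreasing_by)
lemma pvFilterMonoLen (tl : List Int) (x : Int) :
    (tl.filter fun y => decide (y ≤ x - 1)).length ≤ (tl.filter fun y => decide (y ≤ x)).length := by
  have h : (tl.filter fun y => decide (y ≤ x - 1))
      = ((tl.filter fun y => decide (y ≤ x)).filter fun y => decide (y ≤ x - 1)) := by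
    rw [List.filter_filter]
    apply List.filter_congr
    intro a _
    by_cases h : a ≤ x - 1
    · simp [h]; omega
    · simp [h]
  rw [h]
  exact List.length_filter_le _ _

lemma pvFilterLtOfMem {seen : List Int} {x : Int} (h : x ∈ seen) :
    (seen.filter fun y => decide (y ≤ x - 1)).length < (seen.filter fun y => decide (y ≤ x)).length := by
  induction seen with
  | nil => simp at h
  | cons a tl ih =>
    simp only [List.filter_cons]
    rcases List.mem_cons.mp h with heq | ha
    · subst heq
      rw [if_neg (by simp), if_pos (by simp)]
      have := pvFilterMonoLen tl x
      simp only [List.length_cons]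
      omega
    · by_cases h1 : a ≤ x - 1
      · rw [if_pos (by simp [h1]), if_pos (by simp; omega)]
        simpa using ih ha
      · by_cases h2 : a ≤ x
        · rw [if_neg (by simp [h1]), if_pos (by simp [h2])]
          have := ih ha
          simp only [List.length_cons]
          omega
        · rw [if_neg (by simp [h1]), if_neg (by simp [h2])]
          exact ih ha

-- `x = m; while x in seen: x -= 1`
def findTop (seen : List Int) (x : Int) : Int :=
  if h : x ∈ seen then findTop seen (x - 1) else x
termination_by (seen.filter fun y => decide (y ≤ x)).length
decreasing_by exact pvFilterLtOfMem h

-- the for-loop over `order`: state is (seen, m, count)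
def solutionAltLoop (ordq : List Int) (seen : PySem.Set Int) (m n count : Int) : Int :=
  match ordq with
  | [] => count
  | t :: rest =>
    if t > m then
      if t > n then count
      else solutionAltLoop rest (PySem.Set.add seen t) t n (count + 1)
    else
      if findTop seen m < 1 ∨ findTop seen m ≠ t then count
      else solutionAltLoop rest (PySem.Set.add seen t) m n (count + 1)

def solution_alt (order : List Int) : Int :=
  solutionAltLoop order PySem.Set.empty 0 (order.length : Int) 0

-- ===== PRECONDITION & SPEC =====
def Spec_solution (order : List Int) (out : Int) : Prop := out = solution_alt order
instance (order : List Int) (out : Int) : Decidable (Spec_solution order out) := by unfold Spec_solution; infer_instance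

-- ===== CLAIM (what is proved, stated in full; the proofs are below) =====
def Claim_equal_solution : Prop := ∀ (order : List Int), Dom_solution order → Spec_solution order (solution order)

-- ===== LEMMAS AND PROOFS =====

-- the belt of A as a function of the running maximum: the boxes nb..n
def beltFrom (nb n : Int) : List Int :=
  if nb ≤ n then nb :: beltFrom (nb + 1) n else []
termination_by (n + 1 - nb).toNat
decreasing_by omega

-- A's conveyor as a function of B's state: m, m-1, …, 1 with the loaded boxes removed
def convOf (m : Int) (seen : List Int) : List Int :=
  if h : 1 ≤ m then
    (if m ∈ seen then convOf (m - 1) seen else m :: convOf (m - 1) seen)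
  else []
termination_by m.toNat
decreasing_by all_goals omega

lemma convOf_eq_nil {m : Int} {seen : List Int} (h : ¬ 1 ≤ m) : convOf m seen = [] := by
  rw [convOf]; simp [h]

lemma convOf_eq_skip {m : Int} {seen : List Int} (h1 : 1 ≤ m) (h2 : m ∈ seen) :
    convOf m seen = convOf (m - 1) seen := by
  rw [convOf]; rw [dif_pos h1, if_pos h2]

lemma convOf_eq_cons {m : Int} {seen : List Int} (h1 : 1 ≤ m) (h2 : m ∉ seen) :
    convOf m seen = m :: convOf (m - 1) seen := by
  rw [convOf]; rw [dif_pos h1, if_neg h2]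

lemma beltFrom_nil {nb n : Int} (h : ¬ nb ≤ n) : beltFrom nb n = [] := by
  rw [beltFrom]; simp [h]

lemma beltFrom_cons {nb n : Int} (h : nb ≤ n) : beltFrom nb n = nb :: beltFrom (nb + 1) n := by
  rw [beltFrom]; simp [h]

lemma beltFrom_eq_range : ∀ (k : Nat) (nb : Int),
    beltFrom nb (nb + k - 1) = (List.range k).map (fun (i : Nat) => nb + (i : Int)) := by
  intro k
  induction k with
  | zero => intro nb; rw [beltFrom_nil (by omega)]; simp
  | succ k ih =>
    intro nb
    rw [beltFrom_cons (by omega)]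
    have h2 : (nb : Int) + 1 + k - 1 = nb + (k + 1 : Nat) - 1 := by push_cast; ring
    have := ih (nb + 1)
    rw [h2] at this
    rw [this, List.range_succ_eq_map, List.map_cons, List.map_map]
    refine List.cons_eq_cons.mpr ⟨by simp, List.map_congr_left ?_⟩
    intro i _
    simp only [Function.comp_apply]
    push_cast; ring

lemma mem_convOf (m : Int) (seen : List Int) : ∀ y ∈ convOf m seen, 1 ≤ y ∧ y ≤ m := by
  by_cases hm : 1 ≤ m
  · have ih := mem_convOf (m - 1) seen
    by_cases hin : m ∈ seen
    · rw [convOf_eq_skip hm hin]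
      intro y hy; have := ih y hy; omega
    · rw [convOf_eq_cons hm hin]
      intro y hy
      rcases List.mem_cons.mp hy with rfl | hy'
      · omega
      · have := ih y hy'; omega
  · rw [convOf_eq_nil hm]; intro y hy; simp at hy
termination_by m.toNat
decreasing_by all_goals omega

lemma convOf_congr (m : Int) (s₁ s₂ : List Int)
    (h : ∀ y : Int, 1 ≤ y → y ≤ m → (y ∈ s₁ ↔ y ∈ s₂)) : convOf m s₁ = convOf m s₂ := by
  by_cases hm : 1 ≤ m
  · have hmem : m ∈ s₁ ↔ m ∈ s₂ := h m hm le_rfl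
    have ih := convOf_congr (m - 1) s₁ s₂ (fun y h1 h2 => h y h1 (by omega))
    by_cases hin : m ∈ s₁
    · rw [convOf_eq_skip hm hin, convOf_eq_skip hm (hmem.mp hin), ih]
    · rw [convOf_eq_cons hm hin, convOf_eq_cons hm (fun hh => hin (hmem.mpr hh)), ih]
  · rw [convOf_eq_nil hm, convOf_eq_nil hm]
termination_by m.toNat
decreasing_by all_goals omega

lemma findTop_le (seen : List Int) (x : Int) : findTop seen x ≤ x := by
  rw [findTop]
  by_cases h : x ∈ seen
  · rw [dif_pos h]; have := findTop_le seen (x - 1); omega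
  · rw [dif_neg h]
termination_by (seen.filter fun y => decide (y ≤ x)).length
decreasing_by exact pvFilterLtOfMem h

lemma findTop_eq_headD (m : Int) (seen : List Int) (hm : 0 ≤ m)
    (hs : ∀ y ∈ seen, 1 ≤ y) : findTop seen m = (convOf m seen).headD 0 := by
  by_cases h1 : 1 ≤ m
  · by_cases hin : m ∈ seen
    · rw [convOf_eq_skip h1 hin, findTop, dif_pos hin]
      exact findTop_eq_headD (m - 1) seen (by omega) hs
    · rw [convOf_eq_cons h1 hin, findTop, dif_neg hin]
      simp
  · have hm0 : m = 0 := by omega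
    subst hm0
    rw [convOf_eq_nil h1]
    rw [findTop, dif_neg (fun h => by have := hs 0 h; omega)]
    simp
termination_by m.toNat
decreasing_by all_goals omega

lemma convOf_pop (m t : Int) (seen : List Int) (h1 : 1 ≤ t) (hmt : t ≤ m)
    (hft : findTop seen m = t) : convOf m seen = t :: convOf (t - 1) seen := by
  have hm1 : 1 ≤ m := by omega
  by_cases hin : m ∈ seen
  · rw [convOf_eq_skip hm1 hin]
    have hft' : findTop seen (m - 1) = t := by
      rw [findTop, dif_pos hin] at hft; exact hft
    have htle : t ≤ m - 1 := by have := findTop_le seen (m - 1); omega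
    exact convOf_pop (m - 1) t seen h1 htle hft'
  · have htm : t = m := by rw [findTop, dif_neg hin] at hft; omega
    subst htm
    rw [convOf_eq_cons hm1 hin]
termination_by m.toNat
decreasing_by all_goals omega

lemma convOf_pop_add (m t : Int) (seen : List Int) (h1 : 1 ≤ t) (hmt : t ≤ m)
    (hft : findTop seen m = t) : convOf m (PySem.Set.add seen t) = convOf (t - 1) seen := by
  have hm1 : 1 ≤ m := by omega
  by_cases hin : m ∈ seen
  · rw [convOf_eq_skip hm1 ((PySem.Set.mem_add _ _ _).mpr (Or.inl hin))]
    have hft' : findTop seen (m - 1) = t := by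
      rw [findTop, dif_pos hin] at hft; exact hft
    have htle : t ≤ m - 1 := by have := findTop_le seen (m - 1); omega
    exact convOf_pop_add (m - 1) t seen h1 htle hft'
  · have htm : t = m := by rw [findTop, dif_neg hin] at hft; omega
    subst htm
    rw [convOf_eq_skip hm1 ((PySem.Set.mem_add _ _ _).mpr (Or.inr rfl))]
    apply convOf_congr
    intro y hy1 hy2
    rw [PySem.Set.mem_add]
    constructor
    · rintro (h | rfl)
      · exact h
      · omega
    · exact Or.inl
termination_by m.toNat
decreasing_by all_goals omega

-- conv grows by one fresh box (used while A transfers belt → conveyor)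
lemma convOf_push (j : Int) (seen : List Int) (h0 : 0 ≤ j)
    (hnin : (j + 1) ∉ seen) : convOf (j + 1) seen = (j + 1) :: convOf j seen := by
  rw [convOf_eq_cons (by omega) hnin, show (j + 1 - 1 : Int) = j by ring]

-- adding a box above m does not change the conveyor
lemma convOf_add_gt (m t : Int) (seen : List Int) (h : m < t) :
    convOf m (PySem.Set.add seen t) = convOf m seen := by
  apply convOf_congr
  intro y hy1 hy2
  rw [PySem.Set.mem_add]
  constructor
  · rintro (hh | rfl)
    · exact hh
    · omega
  · exact Or.inl

-- when the targets run out, A just drains the belt onto the conveyor and stops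
lemma loop_nil (belt : List Int) : ∀ (conv res : List Int), solutionLoop [] belt conv res = res := by
  induction belt with
  | nil =>
    intro conv res
    rw [solutionLoop]
    apply dif_neg
    rintro (h | ⟨hc, hh⟩)
    · exact h rfl
    · cases conv with
      | nil => exact hc rfl
      | cons a l => simp at hh
  | cons b bs ih =>
    intro conv res
    rw [solutionLoop]
    rw [dif_pos (Or.inl (by simp))]
    rw [dif_neg (by rintro ⟨hc, hh⟩; cases conv with | nil => exact hc rfl | cons a l => simp at hh)]
    rw [dif_neg (by simp)]
    exact ih (b :: conv) res

-- A's push phase for a fresh target t > j: transfer j+1, j+2, … until t is reached (loaded)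
-- or the belt runs out (stuck)
lemma push_phase (n t m : Int) (rest seen res : List Int) (hm0 : 0 ≤ m) (hsm : ∀ y ∈ seen, y ≤ m)
    (j : Int) (hmj : m ≤ j) (hjn : j ≤ n) (hjt : j < t) :
    solutionLoop (t :: rest) (beltFrom (j + 1) n) (convOf j seen) res =
      (if t ≤ n then solutionLoop rest (beltFrom (t + 1) n) (convOf (t - 1) seen) (res ++ [t])
       else res) := by
  have hhead : ¬ (convOf j seen ≠ [] ∧ (convOf j seen).head? = (t :: rest).head?) := by
    rintro ⟨hne, hh⟩
    cases hcv : convOf j seen with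
    | nil => exact hne hcv
    | cons a l =>
      rw [hcv] at hh
      simp only [List.head?_cons, Option.some.injEq] at hh
      have := (mem_convOf j seen) a (by rw [hcv]; exact List.mem_cons_self)
      omega
  by_cases hbn : j + 1 ≤ n
  · rw [beltFrom_cons hbn, solutionLoop]
    rw [dif_pos (Or.inl (by simp))]
    rw [dif_neg hhead]
    by_cases hteq : t = j + 1
    · subst hteq
      rw [dif_pos (by simp)]
      simp only [List.tail_cons, List.headI_cons]
      rw [if_pos hbn]
      have : (j : Int) + 1 - 1 = j := by ring
      rw [this]
    · rw [dif_neg (by simp; omega)]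
      simp only [List.tail_cons, List.headI_cons]
      rw [← convOf_push j seen (by omega) (fun h => by have := hsm _ h; omega)]
      exact push_phase n t m rest seen res hm0 hsm (j + 1) (by omega) hbn (by omega)
  · have hjn' : j = n := by omega
    rw [beltFrom_nil (by omega), solutionLoop]
    have hno : ¬ (([] : List Int) ≠ [] ∨ (convOf j seen ≠ [] ∧ (convOf j seen).head? = (t :: rest).head?)) := by
      rintro (h | h)
      · exact h rfl
      · exact hhead h
    rw [dif_neg hno]
    rw [if_neg (by omega)]
termination_by (n - j).toNat
decreasing_by omega

-- A's stuck phase for an unreachable target t ≤ m: the whole belt is drained, nothing matches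
lemma drain_phase (n t m : Int) (rest seen res : List Int)
    (hm0 : 0 ≤ m) (hs : ∀ y ∈ seen, 1 ≤ y ∧ y ≤ m) (htm : t ≤ m)
    (hfail : findTop seen m < 1 ∨ findTop seen m ≠ t)
    (j : Int) (hmj : m ≤ j) (_hjn : j ≤ n) :
    solutionLoop (t :: rest) (beltFrom (j + 1) n) (convOf j seen) res = res := by
  have hhead : ¬ (convOf j seen ≠ [] ∧ (convOf j seen).head? = (t :: rest).head?) := by
    rintro ⟨hne, hh⟩
    cases hcv : convOf j seen with
    | nil => exact hne hcv
    | cons a l =>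
      rw [hcv] at hh
      simp only [List.head?_cons, Option.some.injEq] at hh
      have hmem := (mem_convOf j seen) a (by rw [hcv]; exact List.mem_cons_self)
      by_cases hjm : j = m
      · subst hjm
        have := findTop_eq_headD j seen (by omega) (fun y hy => (hs y hy).1)
        rw [hcv] at this
        simp only [List.headD_cons] at this
        rcases hfail with h | h
        · omega
        · exact h (by omega)
      · -- j > m : the top is the freshly pushed box j > m ≥ t
        have hj1 : 1 ≤ j := by omega
        rw [convOf_eq_cons hj1 (fun hin => by have := hs _ hin; omega)] at hcv
        have : a = j := by injection hcv with h1 _; omega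
        omega
  by_cases hbn : j + 1 ≤ n
  · rw [beltFrom_cons hbn, solutionLoop]
    rw [dif_pos (Or.inl (by simp))]
    rw [dif_neg hhead]
    rw [dif_neg (by simp; omega)]
    simp only [List.tail_cons, List.headI_cons]
    rw [← convOf_push j seen (by omega) (fun h => by have := hs _ h; omega)]
    exact drain_phase n t m rest seen res hm0 hs htm hfail (j + 1) (by omega) hbn
  · rw [beltFrom_nil (by omega), solutionLoop]
    have hno : ¬ (([] : List Int) ≠ [] ∨ (convOf j seen ≠ [] ∧ (convOf j seen).head? = (t :: rest).head?)) := by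
      rintro (h | h)
      · exact h rfl
      · exact hhead h
    rw [dif_neg hno]
termination_by (n - j).toNat
decreasing_by omega

lemma coupling (n : Int) : ∀ (ordq : List Int) (seen : List Int) (m : Int) (res : List Int),
    0 ≤ m → m ≤ n → (∀ y ∈ seen, 1 ≤ y ∧ y ≤ m) →
    ((solutionLoop ordq (beltFrom (m + 1) n) (convOf m seen) res).length : Int)
      = solutionAltLoop ordq seen m n (res.length : Int) := by
  intro ordq
  induction ordq with
  | nil =>
    intro seen m res _ _ _
    rw [loop_nil]
    simp [solutionAltLoop]
  | cons t rest ih =>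
    intro seen m res hm0 hmn hs
    simp only [solutionAltLoop]
    by_cases htm : t > m
    · rw [if_pos htm]
      rw [push_phase n t m rest seen res hm0 (fun y hy => (hs y hy).2) m le_rfl hmn htm]
      by_cases htn : t > n
      · rw [if_neg (by omega), if_pos htn]
      · rw [if_pos (by omega), if_neg htn]
        have hc : convOf t (PySem.Set.add seen t) = convOf (t - 1) seen := by
          rw [convOf_eq_skip (by omega) ((PySem.Set.mem_add _ _ _).mpr (Or.inr rfl))]
          exact convOf_add_gt (t - 1) t seen (by omega)
        rw [← hc]
        have := ih (PySem.Set.add seen t) t (res ++ [t]) (by omega) (by omega)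
          (fun y hy => by
            rcases (PySem.Set.mem_add _ _ _).mp hy with h | rfl
            · have := hs y h; omega
            · omega)
        rw [this]
        simp
    · rw [if_neg htm]
      by_cases hfail : findTop seen m < 1 ∨ findTop seen m ≠ t
      · rw [if_pos hfail]
        rw [drain_phase n t m rest seen res hm0 hs (by omega) hfail m le_rfl hmn]
      · rw [if_neg hfail]
        have hx1 : ¬ findTop seen m < 1 := (not_or.mp hfail).1
        have hft : findTop seen m = t := not_not.mp (not_or.mp hfail).2
        have ht1 : 1 ≤ t := by omega
        have htle : t ≤ m := by have := findTop_le seen m; omega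
        rw [convOf_pop m t seen ht1 htle hft]
        rw [solutionLoop]
        rw [dif_pos (Or.inr ⟨by simp, by simp⟩)]
        rw [dif_pos ⟨by simp, by simp⟩]
        simp only [List.tail_cons, List.headI_cons]
        rw [← convOf_pop_add m t seen ht1 htle hft]
        have := ih (PySem.Set.add seen t) m (res ++ [t]) hm0 hmn
          (fun y hy => by
            rcases (PySem.Set.mem_add _ _ _).mp hy with h | rfl
            · exact hs y h
            · exact ⟨ht1, htle⟩)
        rw [this]
        simp

-- ===== VERDICT (by name: the statement is the Claim_ definition above) =====
theorem solution_spec : Claim_equal_solution := by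
  intro order _
  unfold Spec_solution solution solution_alt
  have hbelt : (List.range order.length).map (fun (i : Nat) => (i : Int) + 1)
      = beltFrom 1 ((order.length : Int)) := by
    have := beltFrom_eq_range order.length 1
    have h1 : (1 : Int) + (order.length : Int) - 1 = (order.length : Int) := by ring
    rw [h1] at this
    rw [this]
    apply List.map_congr_left
    intro i _; ring
  simp only [hbelt]
  have hconv : convOf 0 ([] : List Int) = [] := convOf_eq_nil (by norm_num)
  have := coupling (order.length : Int) order [] 0 [] le_rfl (by omega) (by simp)
  rw [show ((0 : Int) + 1) = 1 by ring, hconv] at this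
  simpa [PySem.Set.empty] using this
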